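-- pv_equiv track=rewrite | github.com/jaikwangg/coding101 | Python/compro/7/5.py | find_divisible_numbers
-- ===== SOURCE A (Python) =====
-- def generate_numbers(sNum, index=0):
--     if index == len(sNum):
--         yield sNum
--         return
--
--     if sNum[index] in 'xy':
--         for digit in '0123456789':
--             new_sNum = sNum[:index] + digit + sNum[index+1:]
--             yield from generate_numbers(new_sNum, index + 1)
--     else:
--         yield from generate_numbers(sNum, index + 1)
--
-- def find_divisible_numbers(sNum, divisor):
--     results = []
--     for num in generate_numbers(sNum):
--         try:
--             num_int = int(num)
--             if num_int % divisor == 0: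
--                 results.append(num_int)
--         except ValueError:
--             continue
--     return results
-- ===== SOURCE B (Python) =====
-- def find_divisible_numbers(sNum, divisor):
--     # Flat odometer enumeration: find wildcard positions once, then decode a
--     # single counter into the digit slots (no recursion, no generator).
--     chars = list(sNum)
--     pos = [i for i, c in enumerate(chars) if c in 'xy']
--     k = len(pos)
--     weights = [10 ** (k - 1 - j) for j in range(k)]
--     results = []
--     for n in range(10 ** k):
--         cs = list(chars)
--         for p, w in zip(pos, weights):
--             cs[p] = chr(48 + n // w % 10)
--         try:
--             v = int(''.join(cs))
--         except ValueError:
--             continue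
--         if v % divisor == 0:
--             results.append(v)
--     return results
-- ===== Notes on version B (the rewrite author's own statement) =====
-- stated objective: alternative
-- what changed: Replaces A's per-index recursive generator (which rebuilds the whole string at every wildcard branch point) by a flat loop: wildcard positions and their decimal weights are computed once, and a single counter 0..10^k-1 is decoded directly into the digit slots of each candidate.
-- outside the precondition, e.g. on find_divisible_numbers('a', 0): A returns [], B returns []
import Mathlib
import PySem

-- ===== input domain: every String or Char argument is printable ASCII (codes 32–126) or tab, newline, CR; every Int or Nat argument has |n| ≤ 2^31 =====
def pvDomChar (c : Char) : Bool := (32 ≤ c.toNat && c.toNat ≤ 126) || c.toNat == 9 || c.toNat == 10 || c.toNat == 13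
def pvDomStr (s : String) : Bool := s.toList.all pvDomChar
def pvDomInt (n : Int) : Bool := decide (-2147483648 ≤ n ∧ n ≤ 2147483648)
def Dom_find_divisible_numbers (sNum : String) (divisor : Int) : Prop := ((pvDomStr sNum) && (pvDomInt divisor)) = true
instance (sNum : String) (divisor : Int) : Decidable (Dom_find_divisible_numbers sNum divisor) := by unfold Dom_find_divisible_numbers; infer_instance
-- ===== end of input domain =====

-- ===== PORT A =====
-- B replaces A's recursive generator by a flat counter loop over precomputed
-- wildcard positions (objective: alternative structure, same exact output).
-- Pre_ excludes only divisor = 0: there Python A raises ZeroDivisionError on the first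
-- candidate that parses as an int (it still returns [] if no candidate parses).

-- helper for A: the recursive generator generate_numbers(sNum, index)
def genA (cs : List Char) (i : Nat) : List (List Char) :=
  if _h : i = cs.length then [cs]
  else
    match hm : PySem.List.pyGet? cs (i : Int) with
    | none => []   -- IndexError: unreachable, genA is only ever called with i ≤ cs.length
    | some c =>
      if c == 'x' || c == 'y' then
        ['0','1','2','3','4','5','6','7','8','9'].flatMap
          (fun d => genA (cs.take i ++ [d] ++ cs.drop (i+1)) (i+1))
      else genA cs (i+1)
termination_by cs.length - i
decreasing_by
  all_goals
    have hlt : i < cs.length := by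
      simp only [PySem.List.pyGet?, PySem.List.pyIdx?] at hm
      split at hm
      · split at hm
        · omega
        · simp at hm
      · omega
  · have hlen : (cs.take i ++ [d] ++ cs.drop (i+1)).length = cs.length := by
      simp; omega
    omega
  · omega

def find_divisible_numbers (sNum : String) (divisor : Int) : List Int :=
  (genA sNum.toList 0).foldl (fun results num =>
    match PySem.Int.ofChars? num with
    | none => results                       -- ValueError: continue
    | some v =>
      if PySem.Int.mod v divisor == 0 then results ++ [v] else results) []

-- ===== PORT B =====
-- helper for B: pos = [i for i, c in enumerate(chars) if c in 'xy']
def wildPosB : List Char → Nat → List Nat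
  | [], _ => []
  | c :: t, i => if c == 'x' || c == 'y' then i :: wildPosB t (i+1) else wildPosB t (i+1)

-- helper for B: weights = [10 ** (k - 1 - j) for j in range(k)]
def weightsB (k : Nat) : List Nat := (List.range k).map (fun j => 10 ^ (k - 1 - j))

-- helper for B: the inner substitution loop (cs[p] = chr(48 + n // w % 10))
def decodeB (chars : List Char) (pw : List (Nat × Nat)) (n : Nat) : List Char :=
  pw.foldl (fun cs q => cs.set q.1 (Char.ofNat (48 + n / q.2 % 10))) chars

def find_divisible_numbers_alt (sNum : String) (divisor : Int) : List Int :=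
  let chars := sNum.toList
  let pos := wildPosB chars 0
  let k := pos.length
  let pw := pos.zip (weightsB k)
  (List.range (10 ^ k)).foldl (fun results n =>
    match PySem.Int.ofChars? (decodeB chars pw n) with
    | none => results                       -- ValueError: continue
    | some v =>
      if PySem.Int.mod v divisor == 0 then results ++ [v] else results) []

-- ===== PRECONDITION & SPEC =====
-- Pre_ excludes exactly divisor = 0, on which Python A raises ZeroDivisionError.
def Pre_find_divisible_numbers (sNum : String) (divisor : Int) : Prop := divisor ≠ 0
instance (sNum : String) (divisor : Int) : Decidable (Pre_find_divisible_numbers sNum divisor) := by unfold Pre_find_divisible_numbers; infer_instance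

def pvWitness_find_divisible_numbers : String × Int := ("1x", 3)

def Spec_find_divisible_numbers (sNum : String) (divisor : Int) (out : List Int) : Prop := out = find_divisible_numbers_alt sNum divisor
instance (sNum : String) (divisor : Int) (out : List Int) : Decidable (Spec_find_divisible_numbers sNum divisor out) := by unfold Spec_find_divisible_numbers; infer_instance

-- ===== CLAIM (what is proved, stated in full; the proofs are below) =====
def Claim_equal_find_divisible_numbers : Prop := ∀ (sNum : String) (divisor : Int), Dom_find_divisible_numbers sNum divisor → Pre_find_divisible_numbers sNum divisor → Spec_find_divisible_numbers sNum divisor (find_divisible_numbers sNum divisor)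

-- ===== LEMMAS AND PROOFS =====

lemma wildPosB_drop (cs : List Char) (i : Nat) (h : i < cs.length) :
    wildPosB (cs.drop i) i =
      if cs[i] == 'x' || cs[i] == 'y' then i :: wildPosB (cs.drop (i+1)) (i+1)
      else wildPosB (cs.drop (i+1)) (i+1) := by
  rw [List.drop_eq_getElem_cons h]
  rfl

lemma weightsB_succ (k : Nat) : weightsB (k+1) = 10^k :: weightsB k := by
  unfold weightsB
  rw [List.range_succ_eq_map]
  simp only [List.map_cons, List.map_map, Nat.sub_zero, Nat.add_sub_cancel]
  congr 1
  apply List.map_congr_left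
  intro j hj
  simp only [Function.comp]
  congr 1
  omega

lemma rangeMul (a b : Nat) :
    List.range (a*b) = (List.range a).flatMap (fun d => (List.range b).map (fun r => d*b + r)) := by
  induction a with
  | zero => simp
  | succ n ih =>
    rw [Nat.succ_mul, List.range_add, ih, List.range_succ, List.flatMap_append]
    simp

lemma divmod10 (d r e k : Nat) (he : e < k) : (d*10^k + r)/10^e % 10 = r/10^e % 10 := by
  have hk : (10:Nat)^k = 10^e * 10^(k-e) := by rw [← pow_add]; congr 1; omega
  rw [hk, show d * (10^e * 10^(k-e)) = 10^e * (d * 10^(k-e)) by ring,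
     Nat.mul_add_div (by positivity)]
  have h2 : d * 10^(k-e) = d * 10^(k-e-1) * 10 := by
    rw [mul_assoc, ← pow_succ]
    congr 2
    omega
  rw [h2, Nat.mul_add_mod_self_right]

lemma divhead (d r k : Nat) (hd : d < 10) (hr : r < 10^k) : (d*10^k + r)/10^k % 10 = d := by
  rw [mul_comm, Nat.mul_add_div (by positivity), Nat.div_eq_of_lt hr]
  omega

-- the trailing weights never see the most significant digit of the counter
lemma decodeB_shift (cs : List Char) (pw : List (Nat × Nat)) (k d r : Nat)
    (hmem : ∀ q ∈ pw, ∃ e, e < k ∧ q.2 = 10^e) :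
    decodeB cs pw (d*10^k + r) = decodeB cs pw r := by
  unfold decodeB
  apply PySem.List.foldl_congr_mem
  intro acc q hq
  obtain ⟨e, he, hq2⟩ := hmem q hq
  rw [hq2, divmod10 d r e k he]

lemma weightsB_zip_mem (rest : List Nat) (k : Nat) :
    ∀ q ∈ rest.zip (weightsB k), ∃ e, e < k ∧ q.2 = 10^e := by
  intro q hq
  have h2 := (List.of_mem_zip hq).2
  unfold weightsB at h2
  simp only [List.mem_map, List.mem_range] at h2
  obtain ⟨j, hj, hw⟩ := h2
  exact ⟨k-1-j, by omega, hw.symm⟩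

-- MAIN LEMMA: the recursive generator enumerates exactly the decoded counter values
lemma genA_eq_decode (fuel : Nat) : ∀ (cs : List Char) (i : Nat), cs.length - i = fuel → i ≤ cs.length →
    genA cs i =
      (List.range (10 ^ (wildPosB (cs.drop i) i).length)).map
        (fun n => decodeB cs ((wildPosB (cs.drop i) i).zip (weightsB (wildPosB (cs.drop i) i).length)) n) := by
  induction fuel with
  | zero =>
    intro cs i hf h
    have hi : i = cs.length := by omega
    subst hi
    rw [genA, dif_pos rfl]
    simp [List.drop_length, wildPosB, decodeB, weightsB]
  | succ m ih =>
    intro cs i hf h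
    have hlt : i < cs.length := by omega
    rw [genA, dif_neg (show ¬ i = cs.length by omega)]
    split
    · -- pyGet? = none: impossible, i is in range
      rename_i hm
      rw [PySem.List.pyGet?_ofNat cs i hlt] at hm
      cases hm
    · rename_i c hm
      rw [PySem.List.pyGet?_ofNat cs i hlt] at hm
      have hc : c = cs[i] := (Option.some.inj hm).symm
      subst hc
      rw [wildPosB_drop cs i hlt]
      by_cases hw : (cs[i] == 'x' || cs[i] == 'y') = true
      · rw [if_pos hw, if_pos hw]
        have hset : ∀ d : Char, cs.take i ++ [d] ++ cs.drop (i+1) = cs.set i d := by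
          intro d
          rw [List.set_eq_take_cons_drop d hlt]; simp
        simp only [hset]
        have hih : ∀ d : Char, genA (cs.set i d) (i+1) =
            (List.range (10 ^ (wildPosB (cs.drop (i+1)) (i+1)).length)).map
              (fun n => decodeB (cs.set i d)
                ((wildPosB (cs.drop (i+1)) (i+1)).zip (weightsB (wildPosB (cs.drop (i+1)) (i+1)).length)) n) := by
          intro d
          have hd : (cs.set i d).drop (i+1) = cs.drop (i+1) := List.drop_set_of_lt (by omega)
          have := ih (cs.set i d) (i+1) (by simp; omega) (by simp; omega)
          rwa [hd] at this
        simp only [hih]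
        set rest := wildPosB (cs.drop (i+1)) (i+1) with hrest
        set k := rest.length with hk
        rw [List.length_cons, weightsB_succ, List.zip_cons_cons,
           show (10:Nat)^(k+1) = 10 * 10^k from by rw [pow_succ]; ring,
           rangeMul 10 (10^k), List.map_flatMap,
           show (['0','1','2','3','4','5','6','7','8','9'] : List Char)
              = (List.range 10).map (fun d => Char.ofNat (48+d)) from by decide,
           List.flatMap_map]
        apply List.flatMap_congr
        intro d hd
        rw [List.map_map]
        apply List.map_congr_left
        intro r hr
        simp only [List.mem_range] at hd hr
        simp only [Function.comp]
        show decodeB (cs.set i (Char.ofNat (48+d))) (rest.zip (weightsB k)) r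
           = decodeB cs ((i, 10^k) :: rest.zip (weightsB k)) (d*10^k + r)
        have hstep : decodeB cs ((i, 10^k) :: rest.zip (weightsB k)) (d*10^k + r)
            = decodeB (cs.set i (Char.ofNat (48 + (d*10^k + r)/10^k % 10))) (rest.zip (weightsB k)) (d*10^k + r) := rfl
        rw [hstep, divhead d r k hd hr,
           decodeB_shift _ _ k d r (weightsB_zip_mem rest k)]
      · rw [if_neg hw, if_neg hw]
        exact ih cs (i+1) (by omega) (by omega)

-- ===== VERDICT (by name: the statement is the Claim_ definition above) =====
theorem find_divisible_numbers_spec : Claim_equal_find_divisible_numbers := by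
  intro sNum divisor _ _
  unfold Spec_find_divisible_numbers find_divisible_numbers find_divisible_numbers_alt
  rw [genA_eq_decode sNum.toList.length sNum.toList 0 rfl (Nat.zero_le _)]
  simp only [List.drop_zero, List.foldl_map]
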